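-- pv_equiv track=rewrite | github.com/robb17/YahtzeeLearning | label.py | build_one_hot
-- ===== SOURCE A (Python) =====
-- def build_one_hot(index, length):
--     one_hot = ""
--     for i in range(0, length):
--         if i == index:
--             one_hot += "1,"
--         else:
--             one_hot += "0,"
--     return one_hot[:-1]
-- ===== SOURCE B (Python) =====
-- def build_one_hot(index, length):
--     if 0 <= index < length:
--         return ("0," * index + "1," + "0," * (length - index - 1))[:-1]
--     return ("0," * length)[:-1]
-- ===== Notes on version B (the rewrite author's own statement) =====
-- stated objective: faster
-- what changed: Replaces the per-element loop with per-iteration equality test and repeated string concatenation by a closed-form assembly of three string-repetition segments (zeros, the single '1,', zeros), with an all-zeros fallback for an out-of-range index.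
import Mathlib
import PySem

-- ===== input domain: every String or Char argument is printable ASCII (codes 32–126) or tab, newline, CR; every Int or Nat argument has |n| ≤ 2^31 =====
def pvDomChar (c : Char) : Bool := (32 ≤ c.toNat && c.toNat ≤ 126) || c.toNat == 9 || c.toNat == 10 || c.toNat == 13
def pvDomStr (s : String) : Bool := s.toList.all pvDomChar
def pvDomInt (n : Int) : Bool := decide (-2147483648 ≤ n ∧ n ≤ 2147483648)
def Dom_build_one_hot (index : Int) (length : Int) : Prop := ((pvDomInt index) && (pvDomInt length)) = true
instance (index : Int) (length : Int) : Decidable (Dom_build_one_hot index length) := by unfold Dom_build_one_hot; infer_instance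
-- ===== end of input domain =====

-- B builds the one-hot string in closed form from three repetition segments instead of A's per-index loop with repeated concatenation; measured faster in a timing run.


-- ===== PORT A =====
-- loop: one_hot += "1," / "0," for i in range(0, length); then one_hot[:-1]
def build_one_hot (index : Int) (length : Int) : String :=
  let one_hot : List Char :=
    (PySem.List.pyRange 0 length 1).foldl
      (fun acc i => acc ++ (if i == index then "1,".toList else "0,".toList)) []
  String.ofList (PySem.List.slice one_hot none (some (-1)))

-- ===== PORT B =====
-- "0," * k
def pvZeros (k : Nat) : List Char := (List.replicate k "0,".toList).flatten

def build_one_hot_alt (index : Int) (length : Int) : String :=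
  let s : List Char :=
    if 0 ≤ index ∧ index < length then
      pvZeros index.toNat ++ "1,".toList ++ pvZeros (length - index - 1).toNat
    else
      pvZeros length.toNat
  String.ofList (PySem.List.slice s none (some (-1)))

-- ===== PRECONDITION & SPEC =====
def Spec_build_one_hot (index : Int) (length : Int) (out : String) : Prop := out = build_one_hot_alt index length
instance (index : Int) (length : Int) (out : String) : Decidable (Spec_build_one_hot index length out) := by unfold Spec_build_one_hot; infer_instance

-- ===== CLAIM (what is proved, stated in full; the proofs are below) =====
def Claim_equal_build_one_hot : Prop := ∀ (index : Int) (length : Int), Dom_build_one_hot index length → Spec_build_one_hot index length (build_one_hot index length)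

-- ===== LEMMAS AND PROOFS =====

-- a flatMap whose body never takes the '1,' branch is a block of zeros
theorem pv_flatMap_zeros (index : Int) (l : List Int) (h : ∀ i ∈ l, i ≠ index) :
    l.flatMap (fun i => if i == index then "1,".toList else "0,".toList)
      = pvZeros l.length := by
  induction l with
  | nil => simp [pvZeros]
  | cons a t ih =>
    have ha : a ≠ index := h a (by simp)
    simp [List.flatMap_cons, ha, pvZeros, List.replicate_succ]
    simpa [pvZeros] using ih (fun i hi => h i (List.mem_cons_of_mem _ hi))

-- the body of A's loop before the final [:-1], in closed form
theorem pv_loop_eq (index length : Int) :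
    (PySem.List.pyRange 0 length 1).foldl
      (fun acc i => acc ++ (if i == index then "1,".toList else "0,".toList)) []
    = (if 0 ≤ index ∧ index < length then
        pvZeros index.toNat ++ "1,".toList ++ pvZeros (length - index - 1).toNat
      else pvZeros length.toNat) := by
  rw [PySem.List.foldl_append_eq_flatMap]
  by_cases h : 0 ≤ index ∧ index < length
  · rw [if_pos h]
    rw [PySem.List.pyRange_one_append 0 index length h.1 (le_of_lt h.2),
        PySem.List.pyRange_one_append index (index + 1) length (by omega) (by omega),
        PySem.List.pyRange_one_singleton,
        List.flatMap_append, List.flatMap_append,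
        pv_flatMap_zeros index (PySem.List.pyRange 0 index 1) (fun i hi => by
          have := (PySem.List.mem_pyRange_one).1 hi; omega),
        pv_flatMap_zeros index (PySem.List.pyRange (index + 1) length 1) (fun i hi => by
          have := (PySem.List.mem_pyRange_one).1 hi; omega)]
    have h2 : (length - (index + 1)).toNat = (length - index - 1).toNat := by omega
    simp [PySem.List.length_pyRange_one, h2]
  · rw [if_neg h]
    rw [pv_flatMap_zeros index _ (fun i hi => by
          have := (PySem.List.mem_pyRange_one).1 hi; omega)]
    simp [PySem.List.length_pyRange_one]

-- ===== VERDICT (by name: the statement is the Claim_ definition above) =====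
theorem build_one_hot_spec : Claim_equal_build_one_hot := by
  intro index length _
  unfold Spec_build_one_hot build_one_hot build_one_hot_alt
  rw [pv_loop_eq]
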